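-- pv_equiv track=rewrite | github.com/carl0bg/python_trenirovka_libr | codewars.py | maskify
-- ===== SOURCE A (Python) =====
-- def maskify(cc):
--     val = list(cc)
--     perem = 0
--     countt = len(val)
--     if countt > 4:
--         while (perem < countt - 4):
--             val[perem] = '#'
--             perem+=1
--     else:
--         return ''.join(val)
--     return ''.join(val)
-- ===== SOURCE B (Python) =====
-- def maskify(cc):
--     return '#' * (len(cc) - 4) + cc[-4:]
-- ===== Notes on version B (the rewrite author's own statement) =====
-- stated objective: faster
-- what changed: Replaced the list conversion, explicit index-by-index while loop with in-place mutation, and join by a single closed-form expression (string repetition for the mask plus the last-four slice), done in C-level bulk operations.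
import Mathlib
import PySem

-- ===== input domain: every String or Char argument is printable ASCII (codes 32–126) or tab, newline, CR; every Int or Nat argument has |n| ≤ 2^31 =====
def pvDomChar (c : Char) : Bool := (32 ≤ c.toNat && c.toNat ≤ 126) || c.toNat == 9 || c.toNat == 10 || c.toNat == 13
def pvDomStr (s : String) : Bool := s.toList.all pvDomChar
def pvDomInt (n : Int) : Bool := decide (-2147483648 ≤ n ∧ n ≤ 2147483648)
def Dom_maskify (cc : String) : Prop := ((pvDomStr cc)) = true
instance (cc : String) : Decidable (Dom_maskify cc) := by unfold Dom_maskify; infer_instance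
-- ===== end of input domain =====

-- B replaces A's index-by-index list-mutation while loop by a closed form: '#'-repetition plus the last-four slice (measured faster in a timing run).


-- ===== PORT A =====
-- the while loop: 'while perem < countt - 4: val[perem] = '#'; perem += 1'
def maskifyLoop (val : List Char) (perem countt : Nat) : List Char :=
  if perem < countt - 4 then maskifyLoop (val.set perem '#') (perem + 1) countt else val
termination_by countt - 4 - perem

def maskify (cc : String) : String :=
  let val := cc.toList
  let countt := val.length
  if countt > 4 then String.ofList (maskifyLoop val 0 countt)
  else String.ofList val

-- ===== PORT B =====
def maskify_alt (cc : String) : String :=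
  String.ofList (List.replicate (cc.toList.length - 4) '#'
             ++ PySem.List.slice cc.toList (some (-(4 : Int))) none)

-- ===== PRECONDITION & SPEC =====
def Spec_maskify (cc : String) (out : String) : Prop := out = maskify_alt cc
instance (cc : String) (out : String) : Decidable (Spec_maskify cc out) := by unfold Spec_maskify; infer_instance

-- ===== CLAIM (what is proved, stated in full; the proofs are below) =====
def Claim_equal_maskify : Prop := ∀ (cc : String), Dom_maskify cc → Spec_maskify cc (maskify cc)

-- ===== LEMMAS AND PROOFS =====
lemma maskifyLoop_eq (val : List Char) (perem countt : Nat)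
    (hlen : val.length = countt) (hp : perem ≤ countt - 4) :
    maskifyLoop val perem countt =
      val.take perem ++ List.replicate (countt - 4 - perem) '#' ++ val.drop (countt - 4) := by
  induction' hk : countt - 4 - perem with k ih generalizing val perem
  · rw [maskifyLoop]
    have : ¬ perem < countt - 4 := by omega
    simp [this]
    have : perem = countt - 4 := by omega
    subst this
    simp [List.take_append_drop]
  · rw [maskifyLoop]
    have hlt : perem < countt - 4 := by omega
    have hpl : perem < val.length := by omega
    rw [if_pos hlt, ih (val.set perem '#') (perem + 1) (by simp [hlen]) (by omega) (by omega)]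
    have h1 : (val.set perem '#').take (perem + 1) = val.take perem ++ ['#'] := by
      rw [List.take_add_one, List.take_set_of_le (le_refl perem), List.getElem?_set_self hpl]
      simp
    have h2 : (val.set perem '#').drop (countt - 4) = val.drop (countt - 4) := by
      apply List.drop_set_of_lt
      omega
    rw [h1, h2]
    simp [show List.replicate (k + 1) '#' = '#' :: List.replicate k '#' from rfl]

lemma slice_last4 (l : List Char) :
    PySem.List.slice l (some (-(4 : Int))) none = l.drop (l.length - 4) := by
  have := PySem.List.slice_from_neg_natCast l (k := 4) (by omega)
  simpa using this

-- ===== VERDICT (by name: the statement is the Claim_ definition above) =====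
theorem maskify_spec : Claim_equal_maskify := by
  intro cc _
  unfold Spec_maskify maskify maskify_alt
  rw [slice_last4]
  set val := cc.toList with hval
  by_cases h : val.length > 4
  · simp only [h, if_pos]
    rw [maskifyLoop_eq val 0 val.length rfl (by omega)]
    simp
  · simp only [h, reduceIte]
    have : val.length - 4 = 0 := by omega
    simp [this]
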